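-- pv_equiv track=rewrite | github.com/MontelioneLab/CSP_UBQ | scripts/apo_holo_exp_conditions.py | _iter_saveframes
-- ===== SOURCE A (Python) =====
-- from typing import Any, Dict, Iterator, List, Optional, Tuple
--
-- def _iter_saveframes(lines: List[str]) -> Iterator[Tuple[int, int, str]]:
--     """Yield (start_line_index, end_line_index_of_save_marker, saveframe_name)."""
--     i = 0
--     n = len(lines)
--     while i < n:
--         raw = lines[i]
--         s = raw.strip()
--         if s.startswith("save_") and s != "save_":
--             name = s
--             start = i
--             i += 1
--             while i < n and lines[i].strip() != "save_":
--                 i += 1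
--             yield (start, i, name)
--             i += 1
--         else:
--             i += 1
-- ===== SOURCE B (Python) =====
-- from typing import Iterator, List, Tuple
--
-- def _iter_saveframes(lines: List[str]) -> Iterator[Tuple[int, int, str]]:
--     """Single flat pass maintaining an open/closed state instead of nested index loops."""
--     is_open = False
--     start = 0
--     name = ""
--     for i, line in enumerate(lines):
--         s = line.strip()
--         if not is_open:
--             if s.startswith("save_") and s != "save_":
--                 is_open, start, name = True, i, s
--         elif s == "save_":
--             yield (start, i, name)
--             is_open = False
--     if is_open:
--         yield (start, len(lines), name)
-- ===== Notes on version B (the rewrite author's own statement) =====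
-- stated objective: idiomatic
-- what changed: Replaced the nested while-loops with manual index arithmetic by a single flat for-loop state machine (open flag + start/name) with one trailing flush for an unterminated final saveframe.
import Mathlib
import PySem

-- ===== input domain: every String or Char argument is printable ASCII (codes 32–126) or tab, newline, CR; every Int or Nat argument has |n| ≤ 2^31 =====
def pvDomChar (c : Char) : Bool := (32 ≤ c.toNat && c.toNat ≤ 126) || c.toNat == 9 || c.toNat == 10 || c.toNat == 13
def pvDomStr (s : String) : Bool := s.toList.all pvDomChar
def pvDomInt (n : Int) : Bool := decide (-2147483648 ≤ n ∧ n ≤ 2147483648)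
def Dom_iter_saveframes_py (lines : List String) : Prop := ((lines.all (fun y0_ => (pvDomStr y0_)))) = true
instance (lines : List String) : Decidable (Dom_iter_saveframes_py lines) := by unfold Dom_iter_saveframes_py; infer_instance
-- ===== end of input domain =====

-- B replaces A's nested while-loops with one flat for-loop state machine (open flag + start/name); same O(n) cost, plainer control flow.

-- ===== PORT A =====
-- inner while: advance i until i = n or lines[i].strip() == "save_"; the first Nat is fuel
-- (a totality guard only: every call supplies fuel ≥ lines.length - i, so the fuel never runs out)
def aScan (lines : List String) : Nat → Nat → Nat
  | 0, i => i
  | fuel + 1, i =>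
    if h : i < lines.length then
      if PySem.Str.strip lines[i] = "save_" then i
      else aScan lines fuel (i + 1)
    else i

-- outer while over the index i, again with a fuel counter as the totality guard
def aOuter (lines : List String) : Nat → Nat → List (Int × Int × String)
  | 0, _ => []
  | fuel + 1, i =>
    if h : i < lines.length then
      let s := PySem.Str.strip lines[i]
      if PySem.Str.startswith s "save_" = true ∧ s ≠ "save_" then
        let j := aScan lines (lines.length - (i + 1)) (i + 1)
        ((i : Int), (j : Int), s) :: aOuter lines fuel (j + 1)
      else aOuter lines fuel (i + 1)
    else []

def iter_saveframes_py (lines : List String) : List (Int × Int × String) :=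
  aOuter lines lines.length 0

-- ===== PORT B =====
-- loop body of the for-loop: state = (yielded so far, open saveframe (start, name) if any)
def bStep (st : List (Int × Int × String) × Option (Int × String)) (p : Int × String) :
    List (Int × Int × String) × Option (Int × String) :=
  let s := PySem.Str.strip p.2
  match st.2 with
  | none =>
      if PySem.Str.startswith s "save_" = true ∧ s ≠ "save_" then (st.1, some (p.1, s)) else st
  | some (start, name) =>
      if s = "save_" then (st.1 ++ [(start, p.1, name)], none) else st

-- trailing flush after the loop
def bFin (n : Int) (r : List (Int × Int × String) × Option (Int × String)) :
    List (Int × Int × String) :=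
  match r.2 with
  | none => r.1
  | some (start, name) => r.1 ++ [(start, n, name)]

def iter_saveframes_py_alt (lines : List String) : List (Int × Int × String) :=
  bFin (lines.length : Int) ((PySem.List.enumerate lines 0).foldl bStep ([], none))

-- ===== PRECONDITION & SPEC =====
def Spec_iter_saveframes_py (lines : List String) (out : List (Int × Int × String)) : Prop := out = iter_saveframes_py_alt lines
instance (lines : List String) (out : List (Int × Int × String)) : Decidable (Spec_iter_saveframes_py lines out) := by unfold Spec_iter_saveframes_py; infer_instance

-- ===== CLAIM (what is proved, stated in full; the proofs are below) =====
def Claim_equal_iter_saveframes_py : Prop := ∀ (lines : List String), Dom_iter_saveframes_py lines → Spec_iter_saveframes_py lines (iter_saveframes_py lines)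

-- ===== LEMMAS AND PROOFS =====

theorem le_aScan (lines : List String) : ∀ (fuel i : Nat), i ≤ aScan lines fuel i := by
  intro fuel
  induction fuel with
  | zero => intro i; simp [aScan]
  | succ f ih =>
    intro i
    simp only [aScan]
    split
    · split
      · exact le_refl _
      · exact Nat.le_trans (Nat.le_succ i) (ih (i + 1))
    · exact le_refl _

-- with enough fuel, aOuter does not depend on the fuel
theorem aOuter_fuel (lines : List String) : ∀ (f f' i : Nat),
    lines.length - i ≤ f → lines.length - i ≤ f' →
    aOuter lines f i = aOuter lines f' i := by
  intro f
  induction f with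
  | zero =>
    intro f' i hf hf'
    have : ¬ i < lines.length := by omega
    cases f' <;> simp [aOuter, this]
  | succ f ih =>
    intro f' i hf hf'
    by_cases hlt : i < lines.length
    · obtain ⟨g, rfl⟩ : ∃ g, f' = g + 1 := ⟨f' - 1, by omega⟩
      simp only [aOuter, hlt, dite_true]
      split
      · have hj := le_aScan lines (lines.length - (i + 1)) (i + 1)
        rw [ih g (aScan lines (lines.length - (i + 1)) (i + 1) + 1) (by omega) (by omega)]
      · exact ih g (i + 1) (by omega) (by omega)
    · cases f' <;> simp [aOuter, hlt]

-- Invariant linking B's fold over the suffix starting at i to A's index loops, in both states.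
theorem main_inv (lines : List String) (k : Nat) :
    ∀ i : Nat, lines.length - i ≤ k → i ≤ lines.length →
      (∀ acc : List (Int × Int × String),
        bFin (lines.length : Int)
            ((PySem.List.enumerate (lines.drop i) (i : Int)).foldl bStep (acc, none)) =
          acc ++ aOuter lines (lines.length - i) i) ∧
      (∀ (acc : List (Int × Int × String)) (start : Int) (name : String),
        bFin (lines.length : Int)
            ((PySem.List.enumerate (lines.drop i) (i : Int)).foldl bStep (acc, some (start, name))) =
          acc ++ ((start, ((aScan lines (lines.length - i) i : Nat) : Int), name) ::
            aOuter lines (lines.length - (aScan lines (lines.length - i) i + 1))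
              (aScan lines (lines.length - i) i + 1))) := by
  induction k with
  | zero =>
    intro i hk hle
    have hi : i = lines.length := by omega
    subst hi
    simp only [List.drop_length, PySem.List.enumerate_nil, List.foldl_nil, Nat.sub_self]
    constructor
    · intro acc
      simp [aOuter, bFin]
    · intro acc start name
      simp [aScan, aOuter, bFin]
  | succ k ih =>
    intro i hk hle
    by_cases hlt : i < lines.length
    · have hdrop : lines.drop i = lines[i] :: lines.drop (i + 1) := by
        rw [List.getElem_cons_drop]
      have hcast : (i : Int) + 1 = ((i + 1 : Nat) : Int) := by push_cast; ring
      have hfi : lines.length - i = (lines.length - (i + 1)) + 1 := by omega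
      have ih' := ih (i + 1) (by omega) (by omega)
      constructor
      · intro acc
        rw [hdrop, PySem.List.enumerate_cons, List.foldl_cons, hcast]
        rw [hfi]
        simp only [aOuter, hlt, dite_true]
        by_cases hc : PySem.Str.startswith (PySem.Str.strip lines[i]) "save_" = true ∧
            PySem.Str.strip lines[i] ≠ "save_"
        · have hT : True ∧ PySem.Str.strip lines[i] ≠ "save_" := ⟨trivial, hc.2⟩
          simp only [bStep, hc]
          rw [if_pos hT, if_pos hT]
          have hj := le_aScan lines (lines.length - (i + 1)) (i + 1)
          rw [ih'.2 acc (i : Int) (PySem.Str.strip lines[i]),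
            aOuter_fuel lines
              (lines.length - (aScan lines (lines.length - (i + 1)) (i + 1) + 1))
              (lines.length - (i + 1))
              (aScan lines (lines.length - (i + 1)) (i + 1) + 1) (by omega) (by omega)]
        · simp only [bStep, hc, if_false]
          rw [ih'.1 acc]
      · intro acc start name
        rw [hdrop, PySem.List.enumerate_cons, List.foldl_cons, hcast]
        rw [hfi]
        simp only [aScan, hlt, dite_true]
        by_cases hc : PySem.Str.strip lines[i] = "save_"
        · simp only [bStep, hc, if_true]
          rw [ih'.1 (acc ++ [(start, (i : Int), name)])]
          simp
        · simp only [bStep, hc, if_false]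
          rw [ih'.2 acc start name]
    · have hi : i = lines.length := by omega
      subst hi
      simp only [List.drop_length, PySem.List.enumerate_nil, List.foldl_nil, Nat.sub_self]
      constructor
      · intro acc
        simp [aOuter, bFin]
      · intro acc start name
        simp [aScan, aOuter, bFin]

-- ===== VERDICT (by name: the statement is the Claim_ definition above) =====
theorem iter_saveframes_py_spec : Claim_equal_iter_saveframes_py := by
  intro lines _
  unfold Spec_iter_saveframes_py iter_saveframes_py iter_saveframes_py_alt
  have h := (main_inv lines lines.length 0 (by omega) (by omega)).1 []
  simpa using h.symm
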